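-- pv_equiv track=rewrite | github.com/ugrceyln/heuristic_optimization | CirclePacking/1d_circle_packing.py | get_swaped_indices
-- ===== SOURCE A (Python) =====
-- def swap_position(list_, pos1, pos2):
--
--     list_[pos1], list_[pos2] = list_[pos2], list_[pos1]
--     return list_
--
-- def get_swaped_indices(l_curr_solution_ori, best_neighbor):
--
--     len_curr_sol = len(l_curr_solution_ori)
--
--     for i in range(0, len_curr_sol - 1):
--         for j in range(i + 1, len_curr_sol):
--             current_solution = l_curr_solution_ori.copy()
--             neighbor = swap_position(current_solution, i, j)
--
--             if neighbor == best_neighbor: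
--                 return (i, j)
-- ===== SOURCE B (Python) =====
-- def get_swaped_indices(l_curr_solution_ori, best_neighbor):
--     n = len(l_curr_solution_ori)
--     if n != len(best_neighbor):
--         return None
--     diffs = [k for k in range(n)
--              if l_curr_solution_ori[k] != best_neighbor[k]]
--     if len(diffs) == 2:
--         p, q = diffs
--         if (l_curr_solution_ori[p] == best_neighbor[q]
--                 and l_curr_solution_ori[q] == best_neighbor[p]):
--             return (p, q)
--     elif not diffs:
--         # best_neighbor equals the original: any swap of two equal elements
--         # produces it; return the lexicographically first such pair.
--         for i in range(n):
--             if l_curr_solution_ori[i] in l_curr_solution_ori[i + 1:]: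
--                 return (i, l_curr_solution_ori.index(l_curr_solution_ori[i], i + 1))
--     return None
-- ===== Notes on version B (the rewrite author's own statement) =====
-- stated objective: faster
-- what changed: Instead of enumerating all index pairs and rebuilding/comparing a swapped copy for each (O(n^3)), B computes the positions where the two lists differ in one pass: exactly two differing positions are checked for the cross condition, zero differing positions reduce to finding the first duplicate pair, and any other diff count yields None.
import Mathlib
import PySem

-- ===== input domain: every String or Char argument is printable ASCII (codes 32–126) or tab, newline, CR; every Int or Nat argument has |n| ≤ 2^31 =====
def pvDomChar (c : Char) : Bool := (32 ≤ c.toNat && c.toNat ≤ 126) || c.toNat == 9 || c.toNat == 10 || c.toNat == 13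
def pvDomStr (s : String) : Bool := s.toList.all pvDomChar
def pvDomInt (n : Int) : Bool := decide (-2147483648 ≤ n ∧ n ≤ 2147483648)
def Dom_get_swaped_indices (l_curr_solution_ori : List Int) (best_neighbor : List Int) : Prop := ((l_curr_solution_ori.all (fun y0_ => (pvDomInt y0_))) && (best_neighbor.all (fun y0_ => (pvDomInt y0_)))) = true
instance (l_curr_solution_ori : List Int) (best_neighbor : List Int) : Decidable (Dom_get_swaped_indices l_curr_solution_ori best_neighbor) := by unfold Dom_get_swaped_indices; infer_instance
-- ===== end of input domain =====

-- B replaces A's brute-force scan over all index pairs (rebuilding and comparing a swapped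
-- copy for each pair) by a single pass over the positions where the two lists differ (objective: faster).

-- ===== PORT A =====
-- simultaneous assignment `list_[pos1], list_[pos2] = list_[pos2], list_[pos1]`:
-- both right-hand values are read from the original list, then written
def swap_position (list_ : List Int) (pos1 pos2 : Nat) : List Int :=
  (list_.set pos1 (list_.getD pos2 0)).set pos2 (list_.getD pos1 0)

def get_swaped_indices (l_curr_solution_ori : List Int) (best_neighbor : List Int) : Option (Int × Int) :=
  let len_curr_sol := l_curr_solution_ori.length
  (List.range (len_curr_sol - 1)).findSome? (fun i =>
    (List.range' (i + 1) (len_curr_sol - (i + 1))).findSome? (fun j =>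
      let current_solution := l_curr_solution_ori
      let neighbor := swap_position current_solution i j
      if neighbor = best_neighbor then some ((i : Int), (j : Int)) else none))

-- ===== PORT B =====
-- the branch on the computed diff list (Source B after `diffs = [...]`);
-- Python's `l.index(v, i + 1)` is (i + 1) + the first index of v in the slice l[i+1:]
def gsiAltCore (l b : List Int) (diffs : List Nat) : Option (Int × Int) :=
  match diffs with
  | [p, q] =>
      if l.getD p 0 = b.getD q 0 ∧ l.getD q 0 = b.getD p 0 then
        some ((p : Int), (q : Int))
      else none
  | [] =>
      (List.range l.length).findSome? (fun i =>
        if (l.drop (i + 1)).contains (l.getD i 0) then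
          (PySem.List.index? (l.drop (i + 1)) (l.getD i 0)).map
            (fun k => ((i : Int), (i : Int) + 1 + (k : Int)))
        else none)
  | _ => none

def get_swaped_indices_alt (l_curr_solution_ori : List Int) (best_neighbor : List Int) : Option (Int × Int) :=
  if l_curr_solution_ori.length ≠ best_neighbor.length then none
  else
    gsiAltCore l_curr_solution_ori best_neighbor
      ((List.range l_curr_solution_ori.length).filter
        (fun k => l_curr_solution_ori.getD k 0 ≠ best_neighbor.getD k 0))

-- ===== PRECONDITION & SPEC =====
def Spec_get_swaped_indices (l_curr_solution_ori : List Int) (best_neighbor : List Int) (out : Option (Int × Int)) : Prop := out = get_swaped_indices_alt l_curr_solution_ori best_neighbor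
instance (l_curr_solution_ori : List Int) (best_neighbor : List Int) (out : Option (Int × Int)) : Decidable (Spec_get_swaped_indices l_curr_solution_ori best_neighbor out) := by unfold Spec_get_swaped_indices; infer_instance

-- ===== CLAIM (what is proved, stated in full; the proofs are below) =====
def Claim_equal_get_swaped_indices : Prop := ∀ (l_curr_solution_ori : List Int) (best_neighbor : List Int), Dom_get_swaped_indices l_curr_solution_ori best_neighbor → Spec_get_swaped_indices l_curr_solution_ori best_neighbor (get_swaped_indices l_curr_solution_ori best_neighbor)

-- ===== LEMMAS AND PROOFS =====

theorem swap_length (l : List Int) (i j : Nat) :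
    (swap_position l i j).length = l.length := by
  simp [swap_position]

theorem getD_drop (l : List Int) (s k : Nat) :
    (l.drop s).getD k 0 = l.getD (s + k) 0 := by
  simp [List.getD, List.getElem?_drop]

theorem list_eq_iff (l b : List Int) :
    l = b ↔ l.length = b.length ∧ ∀ k, k < l.length → l.getD k 0 = b.getD k 0 := by
  constructor
  · rintro rfl; exact ⟨rfl, fun _ _ => rfl⟩
  · rintro ⟨hlen, h⟩
    apply List.ext_getElem hlen
    intro k h1 h2
    have := h k h1
    rwa [List.getD_eq_getElem l 0 h1, List.getD_eq_getElem b 0 h2] at this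

theorem swap_getD (l : List Int) (i j k : Nat) (hij : i < j) (hj : j < l.length) :
    (swap_position l i j).getD k 0 =
      if k = j then l.getD i 0 else if k = i then l.getD j 0 else l.getD k 0 := by
  have hi : i < l.length := lt_trans hij hj
  unfold swap_position
  by_cases hkj : k = j
  · subst hkj
    rw [if_pos rfl]
    simp [List.getD, List.length_set, hj]
  · by_cases hki : k = i
    · subst hki
      rw [if_neg hkj, if_pos rfl]
      simp [List.getD, List.length_set, hi,
        (show ¬ j = k from fun h => hkj h.symm)]
    · rw [if_neg hkj, if_neg hki]
      simp [List.getD,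
        (show ¬ j = k from fun h => hkj h.symm), (show ¬ i = k from fun h => hki h.symm)]

theorem gsi_swap_eq_iff (l b : List Int) (i j : Nat) (hij : i < j) (hj : j < l.length)
    (hlen : l.length = b.length) :
    (swap_position l i j = b) ↔
      (l.getD j 0 = b.getD i 0 ∧ l.getD i 0 = b.getD j 0 ∧
       ∀ k, k < l.length → k ≠ i → k ≠ j → l.getD k 0 = b.getD k 0) := by
  have hi : i < l.length := lt_trans hij hj
  rw [list_eq_iff, swap_length]
  constructor
  · rintro ⟨-, h⟩
    refine ⟨?_, ?_, fun k hk hki hkj => ?_⟩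
    · have := h i hi
      rwa [swap_getD l i j i hij hj, if_neg (by omega), if_pos rfl] at this
    · have := h j hj
      rwa [swap_getD l i j j hij hj, if_pos rfl] at this
    · have := h k hk
      rwa [swap_getD l i j k hij hj, if_neg hkj, if_neg hki] at this
  · rintro ⟨h1, h2, h3⟩
    refine ⟨hlen, fun k hk => ?_⟩
    rw [swap_getD l i j k hij hj]
    by_cases hkj : k = j
    · subst hkj; rw [if_pos rfl]; exact h2
    · by_cases hki : k = i
      · subst hki; rw [if_neg hkj, if_pos rfl]; exact h1
      · rw [if_neg hkj, if_neg hki]; exact h3 k hk hki hkj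

theorem findSome?_congr_mem {α β : Type} (xs : List α) (f g : α → Option β)
    (h : ∀ x ∈ xs, f x = g x) : xs.findSome? f = xs.findSome? g := by
  induction xs with
  | nil => rfl
  | cons x t ih =>
    simp only [List.findSome?_cons, h x (List.mem_cons_self)]
    cases g x with
    | some b => rfl
    | none => exact ih (fun y hy => h y (List.mem_cons_of_mem x hy))

theorem findSome?_of_mem {α β : Type} {f : α → Option β} {xs : List α} {a : α}
    (ha : a ∈ xs) (h : ∀ x ∈ xs, x ≠ a → f x = none) : xs.findSome? f = f a := by
  induction xs with
  | nil => cases ha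
  | cons x t ih =>
    by_cases hx : x = a
    · subst hx
      simp only [List.findSome?_cons]
      cases hfa : f x with
      | some b => rfl
      | none =>
        rw [List.findSome?_eq_none_iff.mpr]
        intro y hy
        by_cases hya : y = x
        · rwa [hya]
        · exact h y (List.mem_cons_of_mem x hy) hya
    · have ha' : a ∈ t := by
        rcases List.mem_cons.mp ha with h' | h'
        · exact absurd h'.symm hx
        · exact h'
      simp only [List.findSome?_cons, h x List.mem_cons_self hx]
      exact ih ha' (fun y hy => h y (List.mem_cons_of_mem x hy))

theorem findSome?_range'_index {β : Type} (t : List Int) (s : Nat) (v : Int) (out : Nat → β) :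
    (List.range' s t.length).findSome?
        (fun j => if t.getD (j - s) 0 = v then some (out j) else none)
    = (PySem.List.index? t v).map (fun k => out (s + k)) := by
  induction t generalizing s with
  | nil => simp [PySem.List.index?]
  | cons x xs ih =>
    rw [List.length_cons, List.range'_succ, List.findSome?_cons]
    by_cases hx : x = v
    · subst hx
      rw [PySem.List.index?_cons_self]
      simp
    · have hs : (x :: xs).getD (s - s) 0 = x := by simp
      rw [if_neg (by rw [hs]; exact hx)]
      rw [findSome?_congr_mem _ _
        (fun j => if xs.getD (j - (s + 1)) 0 = v then some (out j) else none)
        (by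
          intro j hj
          rw [List.mem_range'_1] at hj
          have hdj : j - s = (j - (s + 1)) + 1 := by omega
          rw [hdj, List.getD_cons_succ])]
      rw [ih (s + 1), PySem.List.index?_cons_of_ne xs hx, Option.map_map]
      cases PySem.List.index? xs v with
      | none => rfl
      | some k => simp [Function.comp]; congr 1; omega

theorem inner_eq (l : List Int) (i : Nat) :
    (List.range' (i + 1) (l.length - (i + 1))).findSome?
        (fun j => if swap_position l i j = l then some ((i : Int), (j : Int)) else none)
    = (if (l.drop (i + 1)).contains (l.getD i 0) then
        (PySem.List.index? (l.drop (i + 1)) (l.getD i 0)).map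
          (fun k => ((i : Int), (i : Int) + 1 + (k : Int)))
      else none) := by
  have hcongr : ∀ j ∈ List.range' (i + 1) (l.length - (i + 1)),
      (if swap_position l i j = l then some ((i : Int), (j : Int)) else none)
      = (if (l.drop (i + 1)).getD (j - (i + 1)) 0 = l.getD i 0 then
          some ((i : Int), (j : Int)) else none) := by
    intro j hj
    rw [List.mem_range'_1] at hj
    have hij : i < j := by omega
    have hjn : j < l.length := by omega
    have hd : (l.drop (i + 1)).getD (j - (i + 1)) 0 = l.getD j 0 := by
      rw [getD_drop]; congr 1; omega
    rw [hd]
    by_cases hc : l.getD j 0 = l.getD i 0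
    · rw [if_pos hc, if_pos]
      exact (gsi_swap_eq_iff l l i j hij hjn rfl).mpr ⟨hc, hc.symm, fun _ _ _ _ => rfl⟩
    · rw [if_neg hc, if_neg]
      intro h
      exact hc ((gsi_swap_eq_iff l l i j hij hjn rfl).mp h).1
  rw [findSome?_congr_mem _ _ _ hcongr]
  have hlen : l.length - (i + 1) = (l.drop (i + 1)).length := (List.length_drop).symm
  rw [hlen, findSome?_range'_index (l.drop (i + 1)) (i + 1) (l.getD i 0)
    (fun j => ((i : Int), (j : Int)))]
  by_cases hc : (l.drop (i + 1)).contains (l.getD i 0)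
  · rw [if_pos hc]
    have hmap : ∀ (o : Option Nat),
        Option.map (fun k => (((i : Int), ((i + 1 + k : Nat) : Int)) : Int × Int)) o
        = Option.map (fun k => ((i : Int), (i : Int) + 1 + (k : Int))) o := by
      intro o
      cases o with
      | none => rfl
      | some k =>
        simp only [Option.map_some]
        apply congrArg
        rw [Prod.mk.injEq]
        refine ⟨rfl, ?_⟩
        push_cast
        ring
    exact hmap _
  · rw [if_neg hc]
    have : PySem.List.index? (l.drop (i + 1)) (l.getD i 0) = none := by
      rw [PySem.List.index?_eq_none_iff]
      simpa using hc
    rw [this]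
    rfl

theorem gsi_main (l b : List Int) :
    get_swaped_indices l b = get_swaped_indices_alt l b := by
  by_cases hb : l.length = b.length
  · unfold get_swaped_indices_alt
    rw [if_neg (show ¬ l.length ≠ b.length from fun h => h hb)]
    simp only [get_swaped_indices]
    have hmem : ∀ k, k ∈ (List.range l.length).filter
        (fun k => decide (¬ l.getD k 0 = b.getD k 0)) ↔
        (k < l.length ∧ l.getD k 0 ≠ b.getD k 0) := by
      intro k; simp [List.mem_filter, List.mem_range]
    have hpw : List.Pairwise (· < ·) ((List.range l.length).filter
        (fun k => decide (¬ l.getD k 0 = b.getD k 0))) :=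
      List.Pairwise.sublist List.filter_sublist List.pairwise_lt_range
    rcases hview : (List.range l.length).filter
        (fun k => decide (¬ l.getD k 0 = b.getD k 0)) with - | ⟨p, - | ⟨q, - | ⟨r, t⟩⟩⟩
    all_goals rw [hview] at hmem hpw
    · -- diffs = []: the two lists are equal
      have hlb : l = b := by
        apply (list_eq_iff l b).mpr
        refine ⟨hb, fun k hk => ?_⟩
        by_contra hne
        have := (hmem k).mpr ⟨hk, hne⟩
        simp at this
      subst hlb
      rw [findSome?_congr_mem _ _ _ (fun i _ => inner_eq l i)]
      show _ = (List.range l.length).findSome? _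
      cases hn : l.length with
      | zero => rfl
      | succ m =>
        rw [show m + 1 - 1 = m from rfl, List.range_succ, List.findSome?_append]
        have hdrop : l.drop (m + 1) = [] := by
          apply List.drop_eq_nil_of_le
          omega
        simp [hdrop]
    · -- diffs = [p]
      have hp := (hmem p).mp (by simp)
      show _ = none
      apply List.findSome?_eq_none_iff.mpr
      intro i hi
      rw [List.mem_range] at hi
      apply List.findSome?_eq_none_iff.mpr
      intro j hj
      rw [List.mem_range'_1] at hj
      have hij : i < j := by omega
      have hjn : j < l.length := by omega
      rw [if_neg]
      intro hswap
      obtain ⟨h1, h2, h3⟩ := (gsi_swap_eq_iff l b i j hij hjn hb).mp hswap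
      have hpij : p = i ∨ p = j := by
        by_contra hc
        push Not at hc
        exact hp.2 (h3 p hp.1 hc.1 hc.2)
      have hother : ∀ k, k < l.length → k ≠ p → l.getD k 0 = b.getD k 0 := by
        intro k hk hkp
        by_contra hne
        have h' := (hmem k).mpr ⟨hk, hne⟩
        simp at h'
        exact hkp h'
      rcases hpij with rfl | rfl
      · have hjq := hother j hjn (by omega)
        exact hp.2 (h2.trans (hjq ▸ h1))
      · have hiq := hother i (by omega) (by omega)
        exact hp.2 (h1.trans (hiq ▸ h2))
    · -- diffs = [p, q]
      have hp := (hmem p).mp (by simp)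
      have hq := (hmem q).mp (by simp)
      have hpq : p < q := by
        simp at hpw
        exact hpw
      have hiff : ∀ k, k < l.length → l.getD k 0 ≠ b.getD k 0 → (k = p ∨ k = q) := by
        intro k hk hne
        have := (hmem k).mpr ⟨hk, hne⟩
        simpa using this
      have huniq : ∀ i j, i < j → j < l.length → swap_position l i j = b →
          i = p ∧ j = q := by
        intro i j hij hjn hswap
        obtain ⟨h1, h2, h3⟩ := (gsi_swap_eq_iff l b i j hij hjn hb).mp hswap
        have hpm : p = i ∨ p = j := by
          by_contra hc
          push Not at hc
          exact hp.2 (h3 p hp.1 hc.1 hc.2)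
        have hqm : q = i ∨ q = j := by
          by_contra hc
          push Not at hc
          exact hq.2 (h3 q hq.1 hc.1 hc.2)
        omega
      by_cases hcross : l.getD p 0 = b.getD q 0 ∧ l.getD q 0 = b.getD p 0
      · have hrhs : gsiAltCore l b [p, q] = some ((p : Int), (q : Int)) := by
          simp only [gsiAltCore]
          rw [if_pos hcross]
        rw [hrhs]
        rw [findSome?_of_mem (a := p) (List.mem_range.mpr (by omega))]
        · rw [findSome?_of_mem (a := q) (List.mem_range'_1.mpr (by omega))]
          · rw [if_pos]
            apply (gsi_swap_eq_iff l b p q hpq hq.1 hb).mpr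
            refine ⟨hcross.2, hcross.1, fun k hk hkp hkq => ?_⟩
            by_contra hne
            rcases hiff k hk hne with rfl | rfl
            · exact hkp rfl
            · exact hkq rfl
          · intro j hj hjq
            rw [List.mem_range'_1] at hj
            rw [if_neg]
            intro hswap
            exact hjq (huniq p j (by omega) (by omega) hswap).2
        · intro i hi hip
          rw [List.mem_range] at hi
          apply List.findSome?_eq_none_iff.mpr
          intro j hj
          rw [List.mem_range'_1] at hj
          rw [if_neg]
          intro hswap
          exact hip (huniq i j (by omega) (by omega) hswap).1
      · have hrhs : gsiAltCore l b [p, q] = none := by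
          simp only [gsiAltCore]
          rw [if_neg hcross]
        rw [hrhs]
        apply List.findSome?_eq_none_iff.mpr
        intro i hi
        rw [List.mem_range] at hi
        apply List.findSome?_eq_none_iff.mpr
        intro j hj
        rw [List.mem_range'_1] at hj
        rw [if_neg]
        intro hswap
        obtain ⟨rfl, rfl⟩ := huniq i j (by omega) (by omega) hswap
        obtain ⟨h1, h2, -⟩ := (gsi_swap_eq_iff l b i j (by omega) (by omega) hb).mp hswap
        exact hcross ⟨h2, h1⟩
    · -- three or more diffs
      have hp := (hmem p).mp (by simp)
      have hq := (hmem q).mp (by simp)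
      have hr := (hmem r).mp (by simp)
      have hdist : p < q ∧ q < r := by
        obtain ⟨hpall, hrest⟩ := List.pairwise_cons.mp hpw
        obtain ⟨hqall, -⟩ := List.pairwise_cons.mp hrest
        exact ⟨hpall q (by simp), hqall r (by simp)⟩
      show _ = none
      apply List.findSome?_eq_none_iff.mpr
      intro i hi
      rw [List.mem_range] at hi
      apply List.findSome?_eq_none_iff.mpr
      intro j hj
      rw [List.mem_range'_1] at hj
      have hij : i < j := by omega
      have hjn : j < l.length := by omega
      rw [if_neg]
      intro hswap
      obtain ⟨h1, h2, h3⟩ := (gsi_swap_eq_iff l b i j hij hjn hb).mp hswap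
      have hm : ∀ k, k < l.length → l.getD k 0 ≠ b.getD k 0 → (k = i ∨ k = j) := by
        intro k hk hne
        by_contra hc
        push Not at hc
        exact hne (h3 k hk hc.1 hc.2)
      have h4 := hm p hp.1 hp.2
      have h5 := hm q hq.1 hq.2
      have h6 := hm r hr.1 hr.2
      omega
  · -- lengths differ: both sides are none
    unfold get_swaped_indices_alt
    rw [if_pos hb]
    simp only [get_swaped_indices]
    apply List.findSome?_eq_none_iff.mpr
    intro i _
    apply List.findSome?_eq_none_iff.mpr
    intro j _
    rw [if_neg]
    intro h
    apply hb
    have := congrArg List.length h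
    rwa [swap_length] at this

-- ===== VERDICT (by name: the statement is the Claim_ definition above) =====
theorem get_swaped_indices_spec : Claim_equal_get_swaped_indices := by
  intro l b _
  unfold Spec_get_swaped_indices
  exact gsi_main l b
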